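-- pv_equiv track=rewrite | github.com/pypi-data/pypi-mirror-9 | packages/GraphState/GraphState-1.0.2.tar.gz/GraphState-1.0.2/nickel/nickel.py | NickelToAdjacent
-- ===== SOURCE A (Python) =====
-- import collections
--
-- def NickelToAdjacent(nickel_list):
--     """Returns map of node id to adjacent nodes."""
--     adjacent = {}
--     backward_nodes = collections.defaultdict(list)
--     for node_id, forward_nodes in enumerate(nickel_list):
--         for forward_node in forward_nodes:
--             backward_nodes[forward_node].append(node_id)
--         adjacent[node_id] = backward_nodes[node_id]
--         adjacent[node_id].extend(forward_nodes)
--     for node in adjacent: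
--         adjacent[node].sort()
--     return adjacent
-- ===== SOURCE B (Python) =====
-- def NickelToAdjacent(nickel_list):
--     """Returns map of node id to adjacent nodes."""
--     return {
--         i: sorted([k for k, row in enumerate(nickel_list) for f in row if f == i]
--                   + list(row_i))
--         for i, row_i in enumerate(nickel_list)
--     }
-- ===== Notes on version B (the rewrite author's own statement) =====
-- stated objective: alternative
-- what changed: Instead of A's incremental mutable-dict construction (a backward-edge defaultdict aliased into the result and extended in one forward pass), B computes each node's neighbor list independently and declaratively: for each node i it rescans the whole list collecting every index k whose row mentions i, appends row i's own forward nodes, and sorts - no mutation, no shared references.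
import Mathlib
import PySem

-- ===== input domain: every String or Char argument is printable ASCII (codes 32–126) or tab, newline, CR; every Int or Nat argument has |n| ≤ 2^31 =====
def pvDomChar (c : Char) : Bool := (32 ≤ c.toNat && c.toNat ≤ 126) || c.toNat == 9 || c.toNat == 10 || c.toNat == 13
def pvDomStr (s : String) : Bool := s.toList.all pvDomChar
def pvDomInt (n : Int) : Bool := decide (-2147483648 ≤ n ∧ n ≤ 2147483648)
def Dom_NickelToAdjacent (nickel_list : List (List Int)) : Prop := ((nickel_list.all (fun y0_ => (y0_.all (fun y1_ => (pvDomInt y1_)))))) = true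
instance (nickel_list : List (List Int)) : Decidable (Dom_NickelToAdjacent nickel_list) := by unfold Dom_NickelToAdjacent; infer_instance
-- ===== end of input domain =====

-- B replaces A's incremental mutable-dict construction (a backward-edge defaultdict aliased
-- into the result and extended during one forward pass) with a per-node declarative
-- characterization: each node's list is computed independently by rescanning the whole input
-- for mentions of that node, appending its own row, and sorting; no mutation, no aliasing.


-- ===== PORT A =====
-- A keeps two dicts, but `adjacent[node_id] = backward_nodes[node_id]` ALIASES the same list
-- object, so every later `.append`/`.extend` mutation goes through that shared list; the port
-- models the shared lists exactly by performing every mutation on the single dict `bw`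
-- (defaultdict backward append = `modify f [] (· ++ [node_id])`, the aliased extend =
-- insert at node_id) and reading `adjacent` — whose keys are exactly 0..n-1 in insertion
-- order — off `bw` at the end, sorting each value as A's final loop does.
def NickelToAdjacent (nickel_list : List (List Int)) : List (Int × List Int) :=
  let bw : PySem.Dict Int (List Int) :=
    (PySem.List.enumerate nickel_list).foldl
      (fun bw p =>
        let bw := p.2.foldl (fun bw f => bw.modify f [] (· ++ [p.1])) bw
        bw.insert p.1 (bw.getD p.1 [] ++ p.2))
      PySem.Dict.empty
  (PySem.List.pyRange 0 (nickel_list.length : Int) 1).map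
    (fun i => (i, PySem.List.sorted (bw.getD i []) (fun x => x) false))

-- ===== PORT B =====
-- B: a dict comprehension over enumerate(nickel_list); per node i the inner comprehension
-- rescans the whole enumerate collecting k for every occurrence of i in row k, then appends
-- row i and sorts.
def NickelToAdjacent_alt (nickel_list : List (List Int)) : List (Int × List Int) :=
  (PySem.List.enumerate nickel_list).map
    (fun p =>
      (p.1, PySem.List.sorted
        (((PySem.List.enumerate nickel_list).flatMap
            (fun q => (q.2.filter (fun f => f == p.1)).map (fun _ => q.1))) ++ p.2)
        (fun x => x) false))

-- ===== PRECONDITION & SPEC =====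
def Spec_NickelToAdjacent (nickel_list : List (List Int)) (out : List (Int × List Int)) : Prop := out = NickelToAdjacent_alt nickel_list
instance (nickel_list : List (List Int)) (out : List (Int × List Int)) : Decidable (Spec_NickelToAdjacent nickel_list out) := by unfold Spec_NickelToAdjacent; infer_instance

-- ===== CLAIM (what is proved, stated in full; the proofs are below) =====
def Claim_equal_NickelToAdjacent : Prop := ∀ (nickel_list : List (List Int)), Dom_NickelToAdjacent nickel_list → Spec_NickelToAdjacent nickel_list (NickelToAdjacent nickel_list)

-- ===== LEMMAS AND PROOFS =====

-- per-row contribution of row `row` at index `k` to A's final neighbor list of node `i`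
def cA (k : Int) (row : List Int) (i : Int) : List Int :=
  (row.filter (fun f => f == i)).map (fun _ => k) ++ (if k = i then row else [])

-- A's inner loop (defaultdict backward appends)
lemma A_inner (row : List Int) (d : PySem.Dict Int (List Int)) (k i : Int) :
    (row.foldl (fun bw f => bw.modify f [] (· ++ [k])) d).getD i []
      = d.getD i [] ++ (row.filter (fun f => f == i)).map (fun _ => k) := by
  induction row generalizing d with
  | nil => simp
  | cons f t ih =>
    simp only [List.foldl_cons, ih, List.filter_cons]
    rw [PySem.Dict.getD_modify]
    by_cases h : i = f
    · simp [h]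
    · have hb : (f == i) = false := by simp [Ne.symm h]
      simp [h, hb]

-- A's outer loop: getD i accumulates cA row by row
lemma A_outer (ps : List (Int × List Int)) (d : PySem.Dict Int (List Int)) (i : Int) :
    (ps.foldl
        (fun bw p =>
          let bw := p.2.foldl (fun bw f => bw.modify f [] (· ++ [p.1])) bw
          bw.insert p.1 (bw.getD p.1 [] ++ p.2))
        d).getD i []
      = d.getD i [] ++ ps.flatMap (fun p => cA p.1 p.2 i) := by
  induction ps generalizing d with
  | nil => simp
  | cons p t ih =>
    simp only [List.foldl_cons, ih, List.flatMap_cons]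
    rw [PySem.Dict.getD_insert]
    by_cases h : i = p.1
    · subst h
      simp [A_inner, cA, List.append_assoc]
    · have h' : ¬ p.1 = i := Ne.symm h
      simp [h, A_inner, cA, h', List.append_assoc]

-- splitting a flatMap of appended blocks into two flatMaps, up to permutation
lemma flatMap_append_perm {α β : Type} (l : List α) (f g : α → List β) :
    (l.flatMap (fun x => f x ++ g x)).Perm (l.flatMap f ++ l.flatMap g) := by
  induction l with
  | nil => simp
  | cons x t ih =>
    simp only [List.flatMap_cons, List.append_assoc]
    refine ((ih.append_left (g x)).append_left (f x)).trans
      (List.Perm.append_left (f x) ?_)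
    simpa [List.append_assoc] using
      (List.perm_append_comm (l₁ := g x) (l₂ := t.flatMap f)).append_right (t.flatMap g)

-- a flatMap of ites over a Nodup list collapses to the single matching block
lemma flatMap_ite_nodup : ∀ (l : List Int) (i : Int) (g : Int → List Int),
    l.Nodup → i ∈ l → l.flatMap (fun j => if j = i then g j else []) = g i
  | [], _, _, _, hi => absurd hi List.not_mem_nil
  | j :: t, i, g, hn, hi => by
    rcases List.nodup_cons.mp hn with ⟨hj, hnt⟩
    rw [List.flatMap_cons]
    by_cases h : j = i
    · subst h
      have h0 : t.flatMap (fun k => if k = j then g k else []) = [] := by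
        refine List.flatMap_eq_nil_iff.mpr (fun k hk => ?_)
        exact if_neg (fun (he : k = j) => hj (he ▸ hk))
      rw [if_pos rfl, h0, List.append_nil]
    · rcases List.mem_cons.mp hi with he | hmem
      · exact absurd he.symm h
      · rw [if_neg h, List.nil_append, flatMap_ite_nodup t i g hnt hmem]

-- main equality of the two ports
lemma main_eq (xs : List (List Int)) : NickelToAdjacent xs = NickelToAdjacent_alt xs := by
  unfold NickelToAdjacent NickelToAdjacent_alt
  rw [PySem.List.enumerate_eq_map_pyRange xs ([] : List Int)]
  simp only [PySem.List.len_eq]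
  set R := PySem.List.pyRange 0 (xs.length : Int) 1 with hR
  simp only [List.map_map, List.flatMap_map]
  refine List.map_congr_left ?_
  intro i hi
  have hA : ((R.map (fun j => ((j : Int), PySem.List.pyGetD xs j ([] : List Int)))).foldl
      (fun bw p =>
        let bw := p.2.foldl (fun bw f => bw.modify f ([] : List Int) (· ++ [p.1])) bw
        bw.insert p.1 (bw.getD p.1 [] ++ p.2))
      PySem.Dict.empty).getD i []
      = R.flatMap (fun j => cA j (PySem.List.pyGetD xs j ([] : List Int)) i) := by
    have h0 := A_outer (R.map (fun j => (j, PySem.List.pyGetD xs j []))) PySem.Dict.empty i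
    simpa [List.flatMap_map, Function.comp] using h0
  have hnod : R.Nodup := by rw [hR]; exact PySem.List.nodup_pyRange_one 0 (xs.length : Int)
  have hperm : (R.flatMap (fun j => cA j (PySem.List.pyGetD xs j ([] : List Int)) i)).Perm
      ((R.flatMap (fun j => ((PySem.List.pyGetD xs j ([] : List Int)).filter
          (fun f => f == i)).map (fun _ => j))) ++ PySem.List.pyGetD xs i ([] : List Int)) := by
    have hsplit := flatMap_append_perm R
      (fun j => ((PySem.List.pyGetD xs j ([] : List Int)).filter (fun f => f == i)).map
        (fun _ => j))
      (fun j => if j = i then PySem.List.pyGetD xs j ([] : List Int) else [])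
    unfold cA
    refine hsplit.trans ?_
    rw [flatMap_ite_nodup R i (fun j => PySem.List.pyGetD xs j ([] : List Int)) hnod hi]
  rw [hA]
  exact Prod.ext_iff.mpr ⟨rfl, PySem.List.sorted_eq_sorted_of_perm _ _ _ (fun _ _ h => h) hperm⟩

-- ===== VERDICT (by name: the statement is the Claim_ definition above) =====
theorem NickelToAdjacent_spec : Claim_equal_NickelToAdjacent :=
  fun xs _ => main_eq xs
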